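-- pv_equiv track=rewrite | github.com/gyb1325/leetcode | 188. Best Time to Buy and Sell Stock IV.py | quicksolve
-- ===== SOURCE A (Python) =====
-- def quicksolve(prices):
--     prev = prices[0]
--     res = 0
--     for p in prices[1:]:
--         if p > prev:
--             res += p - prev
--         prev = p
--     return res
-- ===== SOURCE B (Python) =====
-- def quicksolve(prices):
--     valley = peak = prices[0]
--     res = 0
--     for p in prices[1:]:
--         if p >= peak:
--             peak = p
--         else:
--             res += peak - valley
--             valley = peak = p
--     res += peak - valley
--     return res
-- ===== Notes on version B (the rewrite author's own statement) =====
-- stated objective: alternative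
-- what changed: B tracks a running valley/peak pair and commits peak-valley profit once per downturn (plus a final commit), instead of summing every positive per-step difference.
import Mathlib
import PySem

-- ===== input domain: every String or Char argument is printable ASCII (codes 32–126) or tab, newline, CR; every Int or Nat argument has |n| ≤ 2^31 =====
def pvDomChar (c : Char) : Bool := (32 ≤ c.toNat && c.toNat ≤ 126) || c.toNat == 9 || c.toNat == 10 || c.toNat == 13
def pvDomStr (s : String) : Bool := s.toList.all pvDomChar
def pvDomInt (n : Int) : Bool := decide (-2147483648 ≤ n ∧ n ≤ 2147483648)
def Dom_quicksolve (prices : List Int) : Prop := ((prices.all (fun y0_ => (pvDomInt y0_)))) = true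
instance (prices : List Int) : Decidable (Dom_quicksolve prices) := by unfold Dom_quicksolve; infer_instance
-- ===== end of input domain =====

-- B tracks a running valley/peak pair and commits profit once per downturn; equivalent to A's per-step positive-difference sum.

-- ===== PORT A =====
-- A's for-loop as a fold over the state (prev, res); prices[1:] is the tail
def quicksolve (prices : List Int) : Int :=
  match prices with
  | [] => 0  -- unreachable under Pre_quicksolve (Python raises IndexError on prices[0])
  | p0 :: rest =>
    (rest.foldl (fun (s : Int × Int) p =>
      (p, if p > s.1 then s.2 + (p - s.1) else s.2)) (p0, 0)).2

-- ===== PORT B =====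
-- B's for-loop as structural recursion carrying valley, peak, res
def bLoop (valley peak res : Int) : List Int → Int × Int × Int
  | [] => (valley, peak, res)
  | p :: rest =>
    if p ≥ peak then bLoop valley p res rest
    else bLoop p p (res + (peak - valley)) rest

def quicksolve_alt (prices : List Int) : Int :=
  match prices with
  | [] => 0  -- unreachable under Pre_quicksolve (Python raises IndexError on prices[0])
  | p0 :: rest =>
    match bLoop p0 p0 0 rest with
    | (valley, peak, res) => res + (peak - valley)

-- ===== PRECONDITION & SPEC =====
-- Pre_ excludes only the empty list, on which both Pythons raise IndexError at prices[0].
def Pre_quicksolve (prices : List Int) : Prop := prices ≠ []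
instance (prices : List Int) : Decidable (Pre_quicksolve prices) := by unfold Pre_quicksolve; infer_instance
def pvWitness_quicksolve : List Int := [3, 1, 4, 1, 5]

def Spec_quicksolve (prices : List Int) (out : Int) : Prop := out = quicksolve_alt prices
instance (prices : List Int) (out : Int) : Decidable (Spec_quicksolve prices out) := by unfold Spec_quicksolve; infer_instance

-- ===== CLAIM (what is proved, stated in full; the proofs are below) =====
def Claim_equal_quicksolve : Prop := ∀ (prices : List Int), Dom_quicksolve prices → Pre_quicksolve prices → Spec_quicksolve prices (quicksolve prices)

-- ===== LEMMAS AND PROOFS =====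

-- Loop invariant: A's accumulator equals B's committed res plus the pending peak - valley.
theorem quicksolve_key (rest : List Int) : ∀ (valley peak rB : Int),
    (rest.foldl (fun (s : Int × Int) p =>
      (p, if p > s.1 then s.2 + (p - s.1) else s.2)) (peak, rB + (peak - valley))).2
    = (match bLoop valley peak rB rest with
       | (v, k, r) => r + (k - v)) := by
  induction rest with
  | nil => intro valley peak rB; simp [bLoop]
  | cons p rest ih =>
    intro valley peak rB
    simp only [List.foldl_cons, bLoop]
    by_cases h : p ≥ peak
    · have hA : (if p > peak then rB + (peak - valley) + (p - peak) else rB + (peak - valley))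
          = rB + (p - valley) := by
        by_cases h2 : p > peak
        · simp [h2]; ring
        · have : p = peak := le_antisymm (not_lt.mp h2) h
          simp [this]
      simp only [h, if_pos]
      have := ih valley p rB
      simpa [hA] using this
    · have h2 : ¬ p > peak := fun hc => h (le_of_lt hc)
      simp only [if_neg h, h2]
      have := ih p p (rB + (peak - valley))
      simpa using this

-- ===== VERDICT (by name: the statement is the Claim_ definition above) =====
theorem quicksolve_spec : Claim_equal_quicksolve := by
  intro prices _ hpre
  unfold Spec_quicksolve quicksolve quicksolve_alt
  match prices with
  | [] => exact absurd rfl hpre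
  | p0 :: rest =>
    have := quicksolve_key rest p0 p0 0
    simpa using this
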